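-- pv_equiv track=rewrite | github.com/anna-aleksandrova/ads_course | homeworks/hw17/t_17_07_e7465.py | solve
-- ===== SOURCE A (Python) =====
-- class TreeNode:
--     def __init__(self, val):
--         self.val = val
--         self.left = None
--         self.right = None
--
-- class Tree:
--     def __init__(self, head):
--         self.head = head
--
--     def Insert(self, val: int):
--         node = self.head
--         while True:
--             if node.val > val:
--                 if node.left is not None:
--                     node = node.left
--                 else:
--                     node.left = TreeNode(val)
--                     break
--             else:
--                 if node.right is not None:
--                     node = node.right
--                 else:
--                     node.right = TreeNode(val)
--                     break
--
--     def IsSameTree(self, p):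
--         pass
--
-- def DFS(tree, res: list):
--     res.append(tree.val)
--     if tree.left is not None:
--         DFS(tree.left, res)
--     if tree.right is not None:
--         DFS(tree.right, res)
--
-- def solve(tree1: list, tree2: list):
--     Tree1 = Tree(TreeNode(tree1[0]))
--     for el in tree1[1:]:
--         Tree1.Insert(el)
--     Tree2 = Tree(TreeNode(tree2[0]))
--     for el in tree2[1:]:
--         Tree2.Insert(el)
--     res1 = []
--     res2 = []
--     DFS(Tree1.head, res1)
--     DFS(Tree2.head, res2)
--     return res1 == res2
-- ===== SOURCE B (Python) =====
-- def solve(tree1: list, tree2: list):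
--     # Preorder of an insertion-built BST, computed directly by partitioning
--     # the insertion sequence: root = first element, left subtree gets the
--     # later elements < root, right subtree the later elements >= root.
--     def pre(xs):
--         if not xs:
--             return []
--         r, rest = xs[0], xs[1:]
--         return [r] + pre([x for x in rest if x < r]) + pre([x for x in rest if x >= r])
--     return pre(tree1) == pre(tree2)
-- ===== Notes on version B (the rewrite author's own statement) =====
-- stated objective: simpler
-- what changed: B never builds a tree: it computes each BST's preorder directly by recursive partitioning of the insertion sequence (root = first element, left = later elements < root, right = later elements >= root), replacing A's mutable node/pointer insertion loops and accumulator DFS.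
import Mathlib
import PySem

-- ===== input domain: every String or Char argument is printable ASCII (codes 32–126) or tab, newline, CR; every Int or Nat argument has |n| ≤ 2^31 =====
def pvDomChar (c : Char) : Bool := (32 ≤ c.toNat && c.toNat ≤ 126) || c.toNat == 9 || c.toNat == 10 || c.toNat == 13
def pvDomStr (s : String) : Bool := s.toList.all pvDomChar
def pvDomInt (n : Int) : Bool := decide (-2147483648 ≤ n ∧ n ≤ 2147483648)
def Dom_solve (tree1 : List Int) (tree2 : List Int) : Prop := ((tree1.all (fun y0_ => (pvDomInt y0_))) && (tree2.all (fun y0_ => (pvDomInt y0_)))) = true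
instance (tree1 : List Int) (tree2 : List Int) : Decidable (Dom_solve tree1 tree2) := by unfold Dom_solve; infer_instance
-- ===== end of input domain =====

-- B computes each BST's preorder directly by partitioning the insertion sequence (no tree is built); equivalence proved on nonempty inputs (A raises on empty).

-- ===== PORT A =====
-- binary tree of A's TreeNode graph (leaf = None)
inductive BT : Type
  | leaf : BT
  | node : Int → BT → BT → BT
  deriving DecidableEq, Repr

-- Tree.Insert: walk down comparing node.val > val; creating the child at a None slot
-- is the leaf case of this structural recursion.
def insertA (t : BT) (v : Int) : BT :=
  match t with
  | .leaf => .node v .leaf .leaf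
  | .node w l r => if w > v then .node w (insertA l v) r else .node w l (insertA r v)

-- DFS(tree, res): append val, recurse left then right (recursing into None is a no-op)
def dfsA (t : BT) (res : List Int) : List Int :=
  match t with
  | .leaf => res
  | .node v l r => dfsA r (dfsA l (res ++ [v]))

def solve (tree1 : List Int) (tree2 : List Int) : Bool :=
  match tree1, tree2 with
  | h1 :: t1, h2 :: t2 =>
    let T1 := List.foldl insertA (BT.node h1 .leaf .leaf) t1
    let T2 := List.foldl insertA (BT.node h2 .leaf .leaf) t2
    dfsA T1 [] == dfsA T2 []
  | _, _ => false  -- A raises IndexError here (tree[0] on an empty list); outside Pre_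

-- ===== PORT B =====
def preB : List Int → List Int
  | [] => []
  | r :: rest =>
    r :: (preB (rest.filter (fun x => decide (x < r))) ++
          preB (rest.filter (fun x => decide (r ≤ x))))
termination_by xs => xs.length
decreasing_by
  · simpa using (List.length_filter_le _ _).trans (by simp)
  · simpa using (List.length_filter_le _ _).trans (by simp)

def solve_alt (tree1 : List Int) (tree2 : List Int) : Bool :=
  preB tree1 == preB tree2

-- ===== PRECONDITION & SPEC =====
-- A indexes tree1[0] and tree2[0]: both lists must be nonempty.
def Pre_solve (tree1 : List Int) (tree2 : List Int) : Prop := tree1 ≠ [] ∧ tree2 ≠ []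
instance (tree1 : List Int) (tree2 : List Int) : Decidable (Pre_solve tree1 tree2) := by unfold Pre_solve; infer_instance
def pvWitness_solve : List Int × List Int := ([3, 1, 4], [3, 4, 1])

def Spec_solve (tree1 : List Int) (tree2 : List Int) (out : Bool) : Prop := out = solve_alt tree1 tree2
instance (tree1 : List Int) (tree2 : List Int) (out : Bool) : Decidable (Spec_solve tree1 tree2 out) := by unfold Spec_solve; infer_instance

-- ===== CLAIM (what is proved, stated in full; the proofs are below) =====
def Claim_equal_solve : Prop := ∀ (tree1 : List Int) (tree2 : List Int), Dom_solve tree1 tree2 → Pre_solve tree1 tree2 → Spec_solve tree1 tree2 (solve tree1 tree2)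

-- ===== LEMMAS AND PROOFS =====

-- DFS with an accumulator is the accumulator followed by the pure preorder.
theorem dfsA_acc (t : BT) (res : List Int) : dfsA t res = res ++ dfsA t [] := by
  induction t generalizing res with
  | leaf => simp [dfsA]
  | node v l r ihl ihr =>
    simp only [dfsA]
    rw [ihr (dfsA l (res ++ [v])), ihl (res ++ [v]), ihr (dfsA l ([] ++ [v])), ihl ([] ++ [v])]
    simp

-- Folding insertions into a node routes each element to the left/right subtree by its
-- comparison with the node's value.
theorem foldl_insertA_node (xs : List Int) (h : Int) (l r : BT) :
    List.foldl insertA (BT.node h l r) xs =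
      BT.node h (List.foldl insertA l (xs.filter (fun x => decide (x < h))))
                (List.foldl insertA r (xs.filter (fun x => decide (h ≤ x)))) := by
  induction xs generalizing l r with
  | nil => simp
  | cons x xs ih =>
    by_cases hx : x < h
    · simp [insertA, hx, not_le.mpr hx, ih]
    · simp [insertA, hx, not_lt.mp hx, ih]

-- The preorder of the BST built from an insertion sequence is preB of that sequence.
theorem dfs_build_eq_preB : (xs : List Int) → dfsA (List.foldl insertA .leaf xs) [] = preB xs
  | [] => by simp [preB, dfsA]
  | h :: rest => by
    have hl := dfs_build_eq_preB (rest.filter (fun x => decide (x < h)))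
    have hr := dfs_build_eq_preB (rest.filter (fun x => decide (h ≤ x)))
    simp only [List.foldl, insertA]
    rw [foldl_insertA_node, preB, ← hl, ← hr]
    simp only [dfsA]
    rw [dfsA_acc _ ([] ++ [h]), dfsA_acc _ (([] ++ [h]) ++ _)]
    simp
termination_by xs => xs.length
decreasing_by
  · simpa using (List.length_filter_le _ _).trans (by simp)
  · simpa using (List.length_filter_le _ _).trans (by simp)

-- ===== VERDICT (by name: the statement is the Claim_ definition above) =====
theorem solve_spec : Claim_equal_solve := by
  intro tree1 tree2 _ hpre
  obtain ⟨h1, h2⟩ := hpre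
  obtain ⟨a1, t1, rfl⟩ := List.exists_cons_of_ne_nil h1
  obtain ⟨a2, t2, rfl⟩ := List.exists_cons_of_ne_nil h2
  unfold Spec_solve solve solve_alt
  have e1 := dfs_build_eq_preB (a1 :: t1)
  have e2 := dfs_build_eq_preB (a2 :: t2)
  simp only [List.foldl, insertA] at e1 e2
  rw [← e1, ← e2]
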